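-- pv_equiv track=rewrite | github.com/yuga-hashimoto/boatrace-ai | src/boatrace_ai/note/morning.py | group_race_predictions_by_stadium
-- ===== SOURCE A (Python) =====
-- from collections import defaultdict
--
-- def group_race_predictions_by_stadium(race_predictions: list) -> dict:
--     """レース予測を場ごとにグループ化"""
--     groups = defaultdict(list)
--     for rp in race_predictions:
--         stadium_id = rp.get("stadium", 0)
--         groups[stadium_id].append(rp)
--     # 各グループをレース番号順にソート
--     for sid in groups:
--         groups[sid].sort(key=lambda x: x.get("race_number", 0))
--     return dict(groups)
-- ===== SOURCE B (Python) =====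
-- def _insert_sorted(lst, rp):
--     """Return lst (sorted by race_number) with rp inserted after all equal-or-smaller keys."""
--     rn = rp.get("race_number", 0)
--     i = 0
--     while i < len(lst) and lst[i].get("race_number", 0) <= rn:
--         i += 1
--     return lst[:i] + [rp] + lst[i:]
--
-- def group_race_predictions_by_stadium(race_predictions: list) -> dict:
--     """One pass: keep every stadium's list sorted while inserting (no per-group sort pass)."""
--     groups = {}
--     for rp in race_predictions:
--         sid = rp.get("stadium", 0)
--         groups[sid] = _insert_sorted(groups.get(sid, []), rp)
--     return groups
-- ===== Notes on version B (the rewrite author's own statement) =====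
-- stated objective: alternative
-- what changed: Instead of A's two phases (append every prediction to its stadium bucket, then sort each bucket by race number), B makes a single pass that keeps each stadium's list sorted by inserting every prediction at its stable (after-ties) position; key insertion order and tie order are preserved exactly.
import Mathlib
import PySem

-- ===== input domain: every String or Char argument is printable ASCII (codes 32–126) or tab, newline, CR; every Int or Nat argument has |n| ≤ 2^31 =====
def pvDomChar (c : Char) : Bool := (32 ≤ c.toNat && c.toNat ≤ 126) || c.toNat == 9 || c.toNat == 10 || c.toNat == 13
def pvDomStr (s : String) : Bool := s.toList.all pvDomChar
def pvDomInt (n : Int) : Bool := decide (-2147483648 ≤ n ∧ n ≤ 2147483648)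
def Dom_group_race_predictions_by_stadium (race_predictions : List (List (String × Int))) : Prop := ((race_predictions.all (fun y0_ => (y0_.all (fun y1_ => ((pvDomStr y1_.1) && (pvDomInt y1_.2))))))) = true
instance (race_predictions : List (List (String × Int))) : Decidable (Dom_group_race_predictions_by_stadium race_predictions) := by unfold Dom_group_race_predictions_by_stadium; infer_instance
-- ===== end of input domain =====

-- B replaces A's group-then-sort-each-bucket with a single pass that keeps each
-- stadium's bucket sorted by inserting every prediction at its stable position
-- (alternative decomposition, same exact result including key order).


-- rp.get(key, 0) on the record dict rp (used by both Pythons verbatim)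
def pvGet (rp : List (String × Int)) (k : String) : Int :=
  (PySem.Dict.mk rp).getD k 0

-- ===== PORT A =====
def group_race_predictions_by_stadium (race_predictions : List (List (String × Int))) : List (Int × List (List (String × Int))) :=
  -- groups = defaultdict(list); for rp: groups[rp.get("stadium",0)].append(rp)
  let groups := race_predictions.foldl
    (fun d rp => d.modify (pvGet rp "stadium") [] (fun l => l ++ [rp]))
    PySem.Dict.empty
  -- for sid in groups: groups[sid].sort(key=lambda x: x.get("race_number", 0))
  let sortedGroups := groups.keys.foldl
    (fun d sid => d.modify sid [] (fun l => PySem.List.sorted l (fun x => pvGet x "race_number")))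
    groups
  sortedGroups.items

-- ===== PORT B =====
-- _insert_sorted: scan past every element with race_number <= rn, insert rp there
def pvInsertSorted (rp : List (String × Int)) (rn : Int) : List (List (String × Int)) → List (List (String × Int))
  | [] => [rp]
  | y :: ys => if pvGet y "race_number" ≤ rn then y :: pvInsertSorted rp rn ys else rp :: y :: ys

def group_race_predictions_by_stadium_alt (race_predictions : List (List (String × Int))) : List (Int × List (List (String × Int))) :=
  (race_predictions.foldl
    (fun d rp =>
      let sid := pvGet rp "stadium"
      d.insert sid (pvInsertSorted rp (pvGet rp "race_number") (d.getD sid [])))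
    PySem.Dict.empty).items

-- ===== PRECONDITION & SPEC =====
def Spec_group_race_predictions_by_stadium (race_predictions : List (List (String × Int))) (out : List (Int × List (List (String × Int)))) : Prop := out = group_race_predictions_by_stadium_alt race_predictions
instance (race_predictions : List (List (String × Int))) (out : List (Int × List (List (String × Int)))) : Decidable (Spec_group_race_predictions_by_stadium race_predictions out) := by unfold Spec_group_race_predictions_by_stadium; infer_instance

-- ===== CLAIM (what is proved, stated in full; the proofs are below) =====
def Claim_equal_group_race_predictions_by_stadium : Prop := ∀ (race_predictions : List (List (String × Int))), Dom_group_race_predictions_by_stadium race_predictions → Spec_group_race_predictions_by_stadium race_predictions (group_race_predictions_by_stadium race_predictions)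

-- ===== LEMMAS AND PROOFS =====

-- B's linear insertion IS the insertion step of the stable sort.
theorem pvInsertSorted_eq_insertBy (rp : List (String × Int)) (l : List (List (String × Int))) :
    pvInsertSorted rp (pvGet rp "race_number") l
      = PySem.List.insertBy (fun a b => decide (pvGet a "race_number" < pvGet b "race_number")) rp l := by
  induction l with
  | nil => rfl
  | cons y ys ih =>
    simp only [pvInsertSorted, PySem.List.insertBy]
    by_cases h : pvGet y "race_number" ≤ pvGet rp "race_number"
    · rw [if_pos h, if_neg (by simpa using h), ih]
    · rw [if_neg h, if_pos (by simpa using lt_of_not_ge h)]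

theorem foldl_pvInsertSorted_eq_sorted (l : List (List (String × Int))) :
    l.foldl (fun acc rp => pvInsertSorted rp (pvGet rp "race_number") acc) []
      = PySem.List.sorted l (fun x => pvGet x "race_number") := by
  rw [PySem.List.sorted_eq_foldl_insertBy]
  exact PySem.List.foldl_congr_mem l _ _ [] (fun acc rp _ => pvInsertSorted_eq_insertBy rp acc)

-- getD through a keyed modify-loop: only the elements keyed at c act, in order.
theorem getD_foldl_modify_key {κ : Type} [BEq κ] [LawfulBEq κ] [DecidableEq κ] {β ν : Type}
    (l : List β) (key : β → κ) (g : β → ν → ν) (d0 : ν) (d : PySem.Dict κ ν) (c : κ) :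
    (l.foldl (fun d x => d.modify (key x) d0 (g x)) d).getD c d0
      = (l.filter (fun x => key x == c)).foldl (fun acc x => g x acc) (d.getD c d0) := by
  induction l generalizing d with
  | nil => rfl
  | cons x xs ih =>
    simp only [List.foldl_cons, List.filter_cons]
    by_cases h : key x = c
    · have hb : (key x == c) = true := by simpa using h
      rw [hb, if_pos rfl, ih, PySem.Dict.getD_modify, if_pos h.symm, List.foldl_cons, h]
    · have hb : (key x == c) = false := by simpa using h
      rw [hb, if_neg (by simp), ih, PySem.Dict.getD_modify, if_neg (fun hc => h hc.symm)]

-- updating a set with elements it already has changes nothing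
theorem set_update_of_subset {κ : Type} [BEq κ] [LawfulBEq κ] (xs s : List κ)
    (h : ∀ x ∈ xs, x ∈ s) : PySem.Set.update s xs = s := by
  induction xs generalizing s with
  | nil => rfl
  | cons x xs ih =>
    have hx : PySem.Set.add s x = s := by
      simp only [PySem.Set.add, PySem.Set.contains]
      rw [if_pos (by simpa using h x (List.mem_cons_self))]
    simp only [PySem.Set.update, List.foldl_cons]
    rw [show PySem.Set.add s x = s from hx]
    exact ih s (fun y hy => h y (List.mem_cons_of_mem _ hy))

-- ===== VERDICT (by name: the statement is the Claim_ definition above) =====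
theorem group_race_predictions_by_stadium_spec : Claim_equal_group_race_predictions_by_stadium := by
  intro rps _
  unfold Spec_group_race_predictions_by_stadium
  unfold group_race_predictions_by_stadium group_race_predictions_by_stadium_alt
  -- name the three dicts
  set keyS : List (String × Int) → Int := fun rp => pvGet rp "stadium" with hkeyS
  have hBstep : (fun (d : PySem.Dict Int (List (List (String × Int)))) rp =>
        let sid := pvGet rp "stadium"
        d.insert sid (pvInsertSorted rp (pvGet rp "race_number") (d.getD sid [])))
      = fun d rp => d.modify (keyS rp) [] (fun l => pvInsertSorted rp (pvGet rp "race_number") l) := rfl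
  rw [hBstep]
  set D1 := rps.foldl (fun d rp => d.modify (keyS rp) [] (fun l => l ++ [rp])) PySem.Dict.empty with hD1
  set DB := rps.foldl (fun d rp => d.modify (keyS rp) [] (fun l => pvInsertSorted rp (pvGet rp "race_number") l)) PySem.Dict.empty with hDB
  set D2 := D1.keys.foldl (fun d sid => d.modify sid [] (fun l => PySem.List.sorted l (fun x => pvGet x "race_number"))) D1 with hD2
  -- keys
  have hkD1 : D1.keys = PySem.Set.ofList (rps.map keyS) := by
    rw [hD1, PySem.Dict.keys_foldl_modify_key (f := fun _ rp l => l ++ [rp])]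
    rfl
  have hkDB : DB.keys = PySem.Set.ofList (rps.map keyS) := by
    rw [hDB, PySem.Dict.keys_foldl_modify_key (f := fun _ rp l => pvInsertSorted rp (pvGet rp "race_number") l)]
    rfl
  have hkD2 : D2.keys = D1.keys := by
    rw [hD2, PySem.Dict.keys_foldl_modify_key (key := fun x => x) (f := fun _ _ l => PySem.List.sorted l (fun x => pvGet x "race_number")), List.map_id']
    exact set_update_of_subset _ _ (fun x hx => hx)
  have hndD2 : D2.keys.Nodup := by
    rw [hkD2, hkD1]; exact PySem.Set.nodup_ofList _
  have hndDB : DB.keys.Nodup := by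
    rw [hkDB]; exact PySem.Set.nodup_ofList _
  -- values: both dicts hold sorted(filtered) at every key
  have hvD1 : ∀ c, D1.getD c [] = rps.filter (fun rp => keyS rp == c) := by
    intro c
    rw [hD1, getD_foldl_modify_key]
    simpa using PySem.List.foldl_append_singleton_eq_self (l := rps.filter (fun rp => keyS rp == c)) (acc := [])
  have hvDB : ∀ c, DB.getD c []
      = PySem.List.sorted (rps.filter (fun rp => keyS rp == c)) (fun x => pvGet x "race_number") := by
    intro c
    rw [hDB, getD_foldl_modify_key]
    simpa using foldl_pvInsertSorted_eq_sorted (rps.filter (fun rp => keyS rp == c))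
  have hvD2 : ∀ c, D2.getD c []
      = PySem.List.sorted (rps.filter (fun rp => keyS rp == c)) (fun x => pvGet x "race_number") := by
    intro c
    rw [hD2, getD_foldl_modify_key (key := fun x => x)]
    by_cases hc : c ∈ D1.keys
    · have hf : D1.keys.filter (fun x => x == c) = [c] := by
        have hnd1 : D1.keys.Nodup := by rw [hkD1]; exact PySem.Set.nodup_ofList _
        have := hnd1.filter (fun x => x == c)
        -- a Nodup list filtered to the elements equal to c is [c] when c is a member
        have hmem : c ∈ D1.keys.filter (fun x => x == c) := List.mem_filter.mpr ⟨hc, by simp⟩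
        have hsub : ∀ x ∈ D1.keys.filter (fun x => x == c), x = c := by
          intro x hx; simpa using (List.mem_filter.mp hx).2
        rcases hl : D1.keys.filter (fun x => x == c) with _ | ⟨a, t⟩
        · rw [hl] at hmem; cases hmem
        · rw [hl] at hmem hsub this
          have ha : a = c := hsub a List.mem_cons_self
          have ht : t = [] := by
            rcases t with _ | ⟨b, t'⟩
            · rfl
            · exfalso
              have hb : b = c := hsub b (by simp)
              have := List.nodup_cons.mp this
              exact this.1 (by simp [ha, hb])
          rw [ha, ht]
      rw [hf]
      simp [hvD1 c]
    · have hf : D1.keys.filter (fun x => x == c) = [] := by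
        rw [List.filter_eq_nil_iff]
        intro x hx hbx
        exact hc (by simpa using (by simpa using hbx : x = c) ▸ hx)
      have hnone : rps.filter (fun rp => keyS rp == c) = [] := by
        rw [List.filter_eq_nil_iff]
        intro rp hrp hbrp
        apply hc
        rw [hkD1]
        have : c ∈ rps.map keyS := by
          refine List.mem_map.mpr ⟨rp, hrp, by simpa using hbrp⟩
        simpa [PySem.Set.mem_ofList] using this
      rw [hf, hnone]
      simp only [List.foldl_nil, hvD1 c, hnone]
      exact ((PySem.List.sorted_eq_nil_iff [] _ false).mpr rfl).symm
  -- items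
  rw [PySem.Dict.items_eq_map_keys D2 hndD2 [], PySem.Dict.items_eq_map_keys DB hndDB []]
  rw [hkD2, hkD1, hkDB]
  exact List.map_congr_left (fun k _ => by rw [hvD2 k, hvDB k])
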